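-- pv_equiv track=rewrite | github.com/Promaia/promaia-py | promaia/ocr/text_postprocessor 7.py | _preserve_paragraphs
-- ===== SOURCE A (Python) =====
-- def _preserve_paragraphs(text: str) -> str:
--     """
--     Preserve paragraph structure by normalizing line breaks.
--
--     Args:
--         text: Input text
--
--     Returns:
--         Text with preserved paragraphs
--     """
--     # Split into lines
--     lines = text.split('\n')
--
--     # Group lines into paragraphs
--     paragraphs = []
--     current_paragraph = []
--
--     for line in lines:
--         line = line.strip()
--
--         if not line:
--             # Empty line indicates paragraph break
--             if current_paragraph:
--                 paragraphs.append(' '.join(current_paragraph))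
--                 current_paragraph = []
--         else:
--             current_paragraph.append(line)
--
--     # Add last paragraph
--     if current_paragraph:
--         paragraphs.append(' '.join(current_paragraph))
--
--     # Join paragraphs with double line break
--     return '\n\n'.join(paragraphs)
-- ===== SOURCE B (Python) =====
-- def _preserve_paragraphs(text: str) -> str:
--     """Normalize line breaks preserving paragraph structure (span-scan version)."""
--     lines = [l.strip() for l in text.split('\n')]
--     n = len(lines)
--     paragraphs = []
--     i = 0
--     while i < n:
--         if lines[i]:
--             j = i
--             while j < n and lines[j]:
--                 j += 1
--             paragraphs.append(' '.join(lines[i:j]))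
--             i = j
--         else:
--             i += 1
--     return '\n\n'.join(paragraphs)
-- ===== Notes on version B (the rewrite author's own statement) =====
-- stated objective: alternative
-- what changed: Replaces A's stateful accumulator loop (current_paragraph with an end-of-loop flush) by a pre-stripped line list scanned with two indices: each maximal run of nonempty lines is joined in one step, so no pending-paragraph state or final flush exists.
import Mathlib
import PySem

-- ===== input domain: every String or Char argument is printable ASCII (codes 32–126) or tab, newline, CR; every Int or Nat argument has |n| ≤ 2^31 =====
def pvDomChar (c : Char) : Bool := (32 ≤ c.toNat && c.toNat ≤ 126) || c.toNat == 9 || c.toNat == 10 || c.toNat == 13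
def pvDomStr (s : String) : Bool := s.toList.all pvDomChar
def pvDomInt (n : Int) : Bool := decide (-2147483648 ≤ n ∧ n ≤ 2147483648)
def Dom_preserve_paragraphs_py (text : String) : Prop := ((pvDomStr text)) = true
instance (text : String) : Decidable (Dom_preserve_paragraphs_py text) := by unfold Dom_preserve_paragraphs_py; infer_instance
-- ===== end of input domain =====

-- B drops A's stateful current_paragraph accumulator and end-of-loop flush: it strips all
-- lines first and then joins each maximal run of nonempty lines in one step (alternative
-- decomposition, same cost). Equivalence of the return values is proved for all inputs.

-- ===== PORT A =====
def preserve_paragraphs_py (text : String) : String :=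
  -- lines = text.split('\n')
  let lines := PySem.Chars.splitOn text.toList ['\n']
  -- for line in lines: …  (state = (paragraphs, current_paragraph))
  let st := lines.foldl
    (fun (st : List (List Char) × List (List Char)) line =>
      let line := PySem.Chars.strip line
      if line = [] then
        if st.2 ≠ [] then (st.1 ++ [PySem.Chars.join [' '] st.2], ([] : List (List Char)))
        else st
      else (st.1, st.2 ++ [line]))
    (([], []) : List (List Char) × List (List Char))
  -- add last paragraph
  let paragraphs := if st.2 ≠ [] then st.1 ++ [PySem.Chars.join [' '] st.2] else st.1
  String.ofList (PySem.Chars.join ['\n', '\n'] paragraphs)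

-- ===== PORT B =====
-- Source B's outer while loop: skip an empty line, or (inner while = span) take the whole
-- maximal run lines[i:j] of nonempty lines and join it in one step.
def pvParagraphChunks (lines : List (List Char)) : List (List Char) :=
  match lines with
  | [] => []
  | l :: rest =>
    if l.isEmpty then pvParagraphChunks rest
    else
      let p := rest.span (fun x => !x.isEmpty)
      PySem.Chars.join [' '] (l :: p.1) :: pvParagraphChunks p.2
termination_by lines.length
decreasing_by
  · simp
  · simp only [List.span_eq_takeWhile_dropWhile]
    have := List.length_dropWhile_le (fun x : List Char => !x.isEmpty) rest
    simp; omega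

def preserve_paragraphs_py_alt (text : String) : String :=
  -- lines = [l.strip() for l in text.split('\n')]
  let lines := (PySem.Chars.splitOn text.toList ['\n']).map PySem.Chars.strip
  String.ofList (PySem.Chars.join ['\n', '\n'] (pvParagraphChunks lines))

-- ===== PRECONDITION & SPEC =====
def Spec_preserve_paragraphs_py (text : String) (out : String) : Prop := out = preserve_paragraphs_py_alt text
instance (text : String) (out : String) : Decidable (Spec_preserve_paragraphs_py text out) := by unfold Spec_preserve_paragraphs_py; infer_instance

-- ===== CLAIM (what is proved, stated in full; the proofs are below) =====
def Claim_equal_preserve_paragraphs_py : Prop := ∀ (text : String), Dom_preserve_paragraphs_py text → Spec_preserve_paragraphs_py text (preserve_paragraphs_py text)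

-- ===== LEMMAS AND PROOFS =====

-- A's loop body, on an already-stripped line.
def pvStep (st : List (List Char) × List (List Char)) (line : List Char) :
    List (List Char) × List (List Char) :=
  if line = [] then
    if st.2 ≠ [] then (st.1 ++ [PySem.Chars.join [' '] st.2], ([] : List (List Char)))
    else st
  else (st.1, st.2 ++ [line])

-- A's final flush.
def pvFinish (st : List (List Char) × List (List Char)) : List (List Char) :=
  if st.2 ≠ [] then st.1 ++ [PySem.Chars.join [' '] st.2] else st.1

lemma pvHeadDropWhile {p : List Char → Bool} {l : List (List Char)} {e r}
    (h : l.dropWhile p = e :: r) : p e = false := by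
  have := List.head_dropWhile_not (p := p) (l := l) (by simp [h])
  simp only [h, List.head_cons] at this
  simpa using this

-- A maximal nonempty run is absorbed into current_paragraph without any flush.
lemma pvSpanStep (ls : List (List Char)) (paras cur : List (List Char)) :
    List.foldl pvStep (paras, cur) ls =
      List.foldl pvStep (paras, cur ++ ls.takeWhile (fun x => !x.isEmpty))
        (ls.dropWhile (fun x => !x.isEmpty)) := by
  induction ls generalizing cur with
  | nil => simp
  | cons l ls ih =>
    by_cases hl : l = []
    · subst hl; simp [List.takeWhile, List.dropWhile]
    · have hne : (!l.isEmpty) = true := by simp [hl]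
      rw [List.foldl_cons]
      have hstep : pvStep (paras, cur) l = (paras, cur ++ [l]) := by
        simp [pvStep, hl]
      rw [hstep, ih]
      simp [hne]

-- Loop invariant: flushing the final state of A's loop (started with empty
-- current_paragraph) appends exactly B's chunks of the remaining lines.
lemma pvMain : ∀ (n : Nat) (ls : List (List Char)), ls.length ≤ n → ∀ paras : List (List Char),
    pvFinish (List.foldl pvStep (paras, []) ls) = paras ++ pvParagraphChunks ls := by
  intro n
  induction n with
  | zero =>
    intro ls hls paras
    have : ls = [] := List.length_eq_zero_iff.mp (Nat.le_zero.mp hls)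
    subst this
    simp [pvFinish, pvParagraphChunks]
  | succ n ih =>
    intro ls hls paras
    match ls with
    | [] => simp [pvFinish, pvParagraphChunks]
    | l :: ls' =>
      by_cases hl : l = []
      · subst hl
        rw [List.foldl_cons]
        have hstep : pvStep (paras, ([] : List (List Char))) [] = (paras, []) := by
          simp [pvStep]
        rw [hstep, ih ls' (by simpa using Nat.le_of_succ_le_succ hls) paras]
        simp [pvParagraphChunks]
      · have hne : (!l.isEmpty) = true := by simp [hl]
        rw [List.foldl_cons]
        have hstep : pvStep (paras, ([] : List (List Char))) l = (paras, [l]) := by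
          simp [pvStep, hl]
        rw [hstep, pvSpanStep]
        have hchunks : pvParagraphChunks (l :: ls') =
            PySem.Chars.join [' '] (l :: ls'.takeWhile (fun x => !x.isEmpty)) ::
              pvParagraphChunks (ls'.dropWhile (fun x => !x.isEmpty)) := by
          rw [pvParagraphChunks]
          simp [hl, List.span_eq_takeWhile_dropWhile]
        cases hdw : ls'.dropWhile (fun x => !x.isEmpty) with
        | nil =>
          rw [hdw] at hchunks
          rw [List.foldl_nil, hchunks]
          simp [pvFinish, pvParagraphChunks]
        | cons e dw' =>
          have he : e = [] := by
            have := pvHeadDropWhile hdw; simpa using this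
          subst he
          rw [hdw] at hchunks
          rw [List.foldl_cons]
          have hstep2 : pvStep (paras, [l] ++ ls'.takeWhile (fun x => !x.isEmpty)) [] =
              (paras ++ [PySem.Chars.join [' '] (l :: ls'.takeWhile (fun x => !x.isEmpty))], []) := by
            simp [pvStep]
          rw [hstep2]
          have hlen : dw'.length ≤ n := by
            have h1 := List.length_dropWhile_le (fun x : List Char => !x.isEmpty) ls'
            rw [hdw] at h1
            simp only [List.length_cons] at h1 hls
            omega
          rw [ih dw' hlen _]
          rw [hchunks]
          have : pvParagraphChunks ([] :: dw') = pvParagraphChunks dw' := by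
            rw [pvParagraphChunks]; simp
          rw [this]
          simp

-- ===== VERDICT (by name: the statement is the Claim_ definition above) =====
theorem preserve_paragraphs_py_spec : Claim_equal_preserve_paragraphs_py := by
  intro text _
  show preserve_paragraphs_py text = preserve_paragraphs_py_alt text
  unfold preserve_paragraphs_py preserve_paragraphs_py_alt
  have h := pvMain ((PySem.Chars.splitOn text.toList ['\n']).map PySem.Chars.strip).length
    ((PySem.Chars.splitOn text.toList ['\n']).map PySem.Chars.strip) le_rfl []
  rw [List.foldl_map] at h
  have hfun : (fun (st : List (List Char) × List (List Char)) (y : List Char) =>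
      pvStep st (PySem.Chars.strip y)) =
      (fun (st : List (List Char) × List (List Char)) line =>
        let line := PySem.Chars.strip line
        if line = [] then
          if st.2 ≠ [] then (st.1 ++ [PySem.Chars.join [' '] st.2], ([] : List (List Char)))
          else st
        else (st.1, st.2 ++ [line])) := rfl
  rw [hfun] at h
  simp only [pvFinish, List.nil_append] at h
  dsimp only
  rw [h]
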